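-- pv_equiv track=rewrite | github.com/KieceDonc/L2_Info3A | TP6/exo3.py | nb_deces
-- ===== SOURCE A (Python) =====
-- def nb_deces(table,an,mois):
--   deathThisYear = 0
--   deathThisMonth = 0
--   for x in range(len(table)):
--     currentEl = table[x]
--     currentYear = currentEl[0]
--     currentMonth = currentEl[1]
--     currentDeath = currentEl[2]
--     if currentYear == an :
--       deathThisYear += currentDeath
--       if currentMonth == mois :
--         deathThisMonth = currentDeath
--   return [deathThisYear,deathThisMonth]
-- ===== SOURCE B (Python) =====
-- def nb_deces(table, an, mois):
--     death_this_year = sum(el[2] for el in table if el[0] == an)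
--     matches = [el[2] for el in table if el[0] == an and el[1] == mois]
--     death_this_month = matches[-1] if matches else 0
--     return [death_this_year, death_this_month]
-- ===== Notes on version B (the rewrite author's own statement) =====
-- stated objective: simpler
-- what changed: Replaces the single index-driven loop carrying two mutable accumulators with two independent comprehensions: a sum over the year's rows, and the last matching row (or 0) for the month.
import Mathlib
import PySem

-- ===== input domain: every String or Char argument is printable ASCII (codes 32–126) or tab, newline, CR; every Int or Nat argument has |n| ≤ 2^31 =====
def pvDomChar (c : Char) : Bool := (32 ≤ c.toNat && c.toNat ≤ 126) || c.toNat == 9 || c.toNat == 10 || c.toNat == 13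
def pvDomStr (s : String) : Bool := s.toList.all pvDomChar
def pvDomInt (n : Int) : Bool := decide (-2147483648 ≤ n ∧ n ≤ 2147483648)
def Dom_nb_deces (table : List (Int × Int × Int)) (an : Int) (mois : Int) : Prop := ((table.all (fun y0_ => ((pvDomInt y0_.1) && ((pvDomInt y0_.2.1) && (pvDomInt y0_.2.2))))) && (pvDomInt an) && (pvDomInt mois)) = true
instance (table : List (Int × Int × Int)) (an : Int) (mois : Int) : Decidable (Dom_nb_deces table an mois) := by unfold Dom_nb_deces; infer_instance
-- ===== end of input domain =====

-- B replaces A's single loop with two mutable accumulators by two independent scans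
-- (a sum for the year, the last matching row for the month); objective: simpler.

-- ===== PORT A =====
-- A's for-loop over the table, carrying (deathThisYear, deathThisMonth) as the fold state.
def nb_deces (table : List (Int × Int × Int)) (an : Int) (mois : Int) : List Int :=
  let s := table.foldl
    (fun (acc : Int × Int) el =>
      if el.1 = an then
        (acc.1 + el.2.2, if el.2.1 = mois then el.2.2 else acc.2)
      else acc)
    (0, 0)
  [s.1, s.2]

-- ===== PORT B =====
def nb_deces_alt (table : List (Int × Int × Int)) (an : Int) (mois : Int) : List Int :=
  let deathThisYear := ((table.filter (fun el => el.1 == an)).map (fun el => el.2.2)).sum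
  let rows := (table.filter (fun el => el.1 == an && el.2.1 == mois)).map (fun el => el.2.2)
  [deathThisYear, rows.getLastD 0]

-- ===== PRECONDITION & SPEC =====
def Spec_nb_deces (table : List (Int × Int × Int)) (an : Int) (mois : Int) (out : List Int) : Prop := out = nb_deces_alt table an mois
instance (table : List (Int × Int × Int)) (an : Int) (mois : Int) (out : List Int) : Decidable (Spec_nb_deces table an mois out) := by unfold Spec_nb_deces; infer_instance

-- ===== CLAIM (what is proved, stated in full; the proofs are below) =====
def Claim_equal_nb_deces : Prop := ∀ (table : List (Int × Int × Int)) (an : Int) (mois : Int), Dom_nb_deces table an mois → Spec_nb_deces table an mois (nb_deces table an mois)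

-- ===== LEMMAS AND PROOFS =====
theorem nb_deces_loop (table : List (Int × Int × Int)) (an mois : Int) (a b : Int) :
    table.foldl
      (fun (acc : Int × Int) el =>
        if el.1 = an then
          (acc.1 + el.2.2, if el.2.1 = mois then el.2.2 else acc.2)
        else acc)
      (a, b)
    = (a + ((table.filter (fun el => el.1 == an)).map (fun el => el.2.2)).sum,
       ((table.filter (fun el => el.1 == an && el.2.1 == mois)).map (fun el => el.2.2)).getLastD b) := by
  induction table generalizing a b with
  | nil => simp
  | cons el t ih =>
    by_cases hy : el.1 = an
    · by_cases hm : el.2.1 = mois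
      · simp only [List.foldl_cons, List.filter_cons, List.map_cons, hy, hm, if_pos,
          beq_self_eq_true, Bool.and_self, ih, List.sum_cons, List.getLastD_cons]
        exact Prod.ext (by ring) rfl
      · simp only [List.foldl_cons, List.filter_cons, List.map_cons, hy, hm, if_pos, if_neg,
          beq_self_eq_true, beq_iff_eq, Bool.true_and, Bool.false_and, ite_false, ih,
          List.sum_cons]
        exact Prod.ext (by ring) rfl
    · simp only [List.foldl_cons, List.filter_cons, beq_iff_eq, hy, Bool.false_and,
        if_neg, ite_false, if_false, ih]
      simp [hy]

-- ===== VERDICT (by name: the statement is the Claim_ definition above) =====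
theorem nb_deces_spec : Claim_equal_nb_deces := by
  intro table an mois _
  unfold Spec_nb_deces nb_deces nb_deces_alt
  rw [nb_deces_loop]
  simp
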